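-- pv_equiv track=rewrite | github.com/Unagi-zoso/five-golds-in-a-day | prog-babbling.py | solution
-- ===== SOURCE A (Python) =====
-- def solution(babbling):
--     def 유한상태머신(string):
--         state = 0
--         for ch in string:
--             if state == 0:
--                 if ch == 'a':
--                     state = 10
--                     continue
--                 if ch == 'y':
--                     state = 11
--                     continue
--                 if ch == 'w':
--                     state = 12
--                     continue
--                 if ch == 'm':
--                     state = 13
--                     continue
--
--             if state == 10 and ch == 'y':
--                 state = 20
--                 continue
--             if state == 11 and ch == 'e':
--                 state = 0
--                 continue
--             if state == 12 and ch == 'o':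
--                 state = 22
--                 continue
--             if state == 13 and ch == 'a':
--                 state = 0
--                 continue
--
--             if state == 20 and ch == 'a':
--                 state = 0
--                 continue
--             if state == 22 and ch == 'o':
--                 state = 0
--                 continue
--
--             return False
--         return state == 0
--
--     answer = 0
--     for 옹알옹알 in babbling:
--         if 유한상태머신(옹알옹알):
--             answer += 1
--     return answer
-- ===== SOURCE B (Python) =====
-- WORDS = ('aya', 'ye', 'woo', 'ma')
--
-- def solution(babbling):
--     def pronounceable(s):
--         pos = 0
--         n = len(s)
--         while pos < n:
--             for w in WORDS:
--                 if s.startswith(w, pos):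
--                     pos += len(w)
--                     break
--             else:
--                 return False
--         return True
--     return sum(pronounceable(s) for s in babbling)
-- ===== Notes on version B (the rewrite author's own statement) =====
-- stated objective: idiomatic
-- what changed: Replaced the hand-written character-by-character finite-state machine with greedy token-level matching over the four accepted words using str.startswith at a moving offset; deterministic because the words start with distinct letters.
import Mathlib
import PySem

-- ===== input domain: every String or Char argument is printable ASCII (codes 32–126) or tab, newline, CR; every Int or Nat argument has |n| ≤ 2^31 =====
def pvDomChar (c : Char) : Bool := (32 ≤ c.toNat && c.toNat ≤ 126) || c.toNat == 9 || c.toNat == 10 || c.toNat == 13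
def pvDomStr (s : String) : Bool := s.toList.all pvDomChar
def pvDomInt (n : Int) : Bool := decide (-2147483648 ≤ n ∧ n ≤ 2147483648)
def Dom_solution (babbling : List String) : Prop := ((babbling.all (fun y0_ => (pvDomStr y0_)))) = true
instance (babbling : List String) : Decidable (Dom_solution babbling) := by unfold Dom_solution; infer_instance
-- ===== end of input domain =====

-- B replaces A's character-level FSM by greedy token matching over the four words; objective: idiomatic (same cost).

-- ===== PORT A =====
-- the inner 유한상태머신: loop over characters carrying `state`, branches in A's order
def pvFsm (state : Int) : List Char → Bool
  | [] => state == 0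
  | ch :: rest =>
    if state == 0 && ch == 'a' then pvFsm 10 rest
    else if state == 0 && ch == 'y' then pvFsm 11 rest
    else if state == 0 && ch == 'w' then pvFsm 12 rest
    else if state == 0 && ch == 'm' then pvFsm 13 rest
    else if state == 10 && ch == 'y' then pvFsm 20 rest
    else if state == 11 && ch == 'e' then pvFsm 0 rest
    else if state == 12 && ch == 'o' then pvFsm 22 rest
    else if state == 13 && ch == 'a' then pvFsm 0 rest
    else if state == 20 && ch == 'a' then pvFsm 0 rest
    else if state == 22 && ch == 'o' then pvFsm 0 rest
    else false

def solution (babbling : List String) : Int :=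
  babbling.foldl (fun answer s => if pvFsm 0 s.toList then answer + 1 else answer) 0

-- ===== PORT B =====
-- Source B's `pronounceable`: advance a position past whichever word startswith-matches
-- (words tried in the order aya, ye, woo, ma); accept when the end is reached.
def pvPronounceable : List Char → Bool
  | [] => true
  | 'a' :: 'y' :: 'a' :: rest => pvPronounceable rest
  | 'y' :: 'e' :: rest => pvPronounceable rest
  | 'w' :: 'o' :: 'o' :: rest => pvPronounceable rest
  | 'm' :: 'a' :: rest => pvPronounceable rest
  | _ => false

def solution_alt (babbling : List String) : Int :=
  babbling.foldl (fun acc s => acc + (if pvPronounceable s.toList then 1 else 0)) 0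

-- ===== PRECONDITION & SPEC =====
def Spec_solution (babbling : List String) (out : Int) : Prop := out = solution_alt babbling
instance (babbling : List String) (out : Int) : Decidable (Spec_solution babbling out) := by unfold Spec_solution; infer_instance

-- ===== CLAIM (what is proved, stated in full; the proofs are below) =====
def Claim_equal_solution : Prop := ∀ (babbling : List String), Dom_solution babbling → Spec_solution babbling (solution babbling)

-- ===== LEMMAS AND PROOFS =====
theorem pvFsm_eq_pron : ∀ (n : Nat) (cs : List Char), cs.length ≤ n → pvFsm 0 cs = pvPronounceable cs := by
  intro n
  induction n with
  | zero =>
    intro cs h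
    have : cs = [] := List.eq_nil_of_length_eq_zero (Nat.le_zero.mp h)
    subst this; rfl
  | succ n ih =>
    intro cs h
    match cs with
    | [] => rfl
    | c :: rest =>
      simp only [List.length_cons, Nat.succ_le_succ_iff] at h
      by_cases ha : c = 'a'
      · subst ha
        match rest with
        | [] => simp [pvFsm, pvPronounceable]
        | c2 :: r2 =>
          by_cases hy : c2 = 'y'
          · subst hy
            match r2 with
            | [] => simp [pvFsm, pvPronounceable]
            | c3 :: r3 =>
              by_cases ha3 : c3 = 'a'
              · subst ha3
                have := ih r3 (by simp at h ⊢; omega)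
                simpa [pvFsm, pvPronounceable] using this
              · simp [pvFsm, pvPronounceable, ha3]
          · simp [pvFsm, pvPronounceable, hy]
      · by_cases hyc : c = 'y'
        · subst hyc
          match rest with
          | [] => simp [pvFsm, pvPronounceable]
          | c2 :: r2 =>
            by_cases he : c2 = 'e'
            · subst he
              have := ih r2 (by simp at h ⊢; omega)
              simpa [pvFsm, pvPronounceable] using this
            · simp [pvFsm, pvPronounceable, he]
        · by_cases hw : c = 'w'
          · subst hw
            match rest with
            | [] => simp [pvFsm, pvPronounceable]
            | c2 :: r2 =>
              by_cases ho : c2 = 'o'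
              · subst ho
                match r2 with
                | [] => simp [pvFsm, pvPronounceable]
                | c3 :: r3 =>
                  by_cases ho3 : c3 = 'o'
                  · subst ho3
                    have := ih r3 (by simp at h ⊢; omega)
                    simpa [pvFsm, pvPronounceable] using this
                  · simp [pvFsm, pvPronounceable, ho3]
              · simp [pvFsm, pvPronounceable, ho]
          · by_cases hm : c = 'm'
            · subst hm
              match rest with
              | [] => simp [pvFsm, pvPronounceable]
              | c2 :: r2 =>
                by_cases ha2 : c2 = 'a'
                · subst ha2
                  have := ih r2 (by simp at h ⊢; omega)
                  simpa [pvFsm, pvPronounceable] using this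
                · simp [pvFsm, pvPronounceable, ha2]
            · simp [pvFsm, pvPronounceable, ha, hyc, hw, hm]

theorem pvFsm_eq_pron' (cs : List Char) : pvFsm 0 cs = pvPronounceable cs :=
  pvFsm_eq_pron cs.length cs (le_refl _)

theorem pvFoldl_eq (babbling : List String) (a : Int) :
    babbling.foldl (fun answer s => if pvFsm 0 s.toList then answer + 1 else answer) a =
    babbling.foldl (fun acc s => acc + (if pvPronounceable s.toList then 1 else 0)) a := by
  induction babbling generalizing a with
  | nil => rfl
  | cons s bs ih =>
    simp only [List.foldl_cons]
    rw [pvFsm_eq_pron']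
    have hstep : (if pvPronounceable s.toList then a + 1 else a) =
        a + (if pvPronounceable s.toList then (1 : Int) else 0) := by
      by_cases h : pvPronounceable s.toList <;> simp [h]
    rw [hstep, ih]

-- ===== VERDICT (by name: the statement is the Claim_ definition above) =====
theorem solution_spec : Claim_equal_solution := by
  intro babbling _
  unfold Spec_solution solution solution_alt
  exact pvFoldl_eq babbling 0
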